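-- pv_equiv track=rewrite | github.com/AhamedAmhar06/numericverifier | backend/app/verifier/pnl_parser.py | _match_canonical
-- ===== SOURCE A (Python) =====
-- from typing import Any, Dict, List, Optional, Tuple
--
-- _SYNONYMS: Dict[str, List[str]] = {
--     "revenue": [
--         "revenue", "sales", "turnover",
--         "total revenue", "net revenue", "net sales", "total net sales",
--         "total revenues",
--     ],
--     "cogs": [
--         "cogs", "cost of sales", "cost of revenue", "cost of goods sold",
--         "cost of products", "cost of services", "total cost of sales",
--         "total cost of revenue",
--     ],
--     "gross_profit": ["gross profit", "gross income"],
--     # Individual opex line items get their own keys so the ratio library can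
--     # verify claims like "R&D as % of revenue" without value collisions.
--     # These keys appear before "operating_expenses" so Pass 1 (exact match)
--     # resolves them first, preventing false matches to "revenue" via Pass 2.
--     "research_and_development": [
--         "research and development", "research development",
--         "research development and engineering",
--     ],
--     "sales_marketing": [
--         "sales and marketing", "selling and marketing", "marketing and sales",
--         "sales marketing and support",
--     ],
--     "operating_expenses": [
--         "operating expenses", "opex", "sg&a",
--         "selling general and administrative", "selling general administrative",
--         "selling general and administrative expenses",
--         "total operating expenses",
--         # Combined opex items and standalone G&A remain here.
--         # Note: "research and development" and "sales and marketing" are now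
--         # handled by the dedicated keys above to prevent value collision when
--         # both appear as separate rows in the same table.
--         "selling marketing and administrative",
--         "general and administrative", "general and administrative expenses",
--     ],
--     "operating_income": [
--         "operating income", "operating profit", "ebit",
--         "income from operations", "operating earnings",
--     ],
--     "taxes": [
--         "tax", "taxes", "income tax", "income taxes",
--         "provision for income taxes", "provision for income tax",
--         "income tax expense",
--     ],
--     "interest": [
--         "interest", "interest expense", "interest income",
--         "net interest expense", "net interest income",
--     ],
--     "net_income": [
--         "net income", "net profit", "profit after tax", "profit",
--         "net earnings", "earnings", "net income attributable",
--     ],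
-- }
--
-- def _normalize_label(s: str) -> str:
--     if not isinstance(s, str):
--         return ""
--     s = s.lower().strip().rstrip(":")          # strip trailing colon (Apple-style)
--     for c in ".,;&":
--         s = s.replace(c, " ")
--     s = s.replace("\u2013", " ").replace("\u2014", " ")   # en/em-dash in labels
--     return " ".join(s.split())
--
-- def _match_canonical(label: str) -> Optional[str]:
--     """Return canonical key if label matches a synonym.  Exact match beats substring."""
--     norm = _normalize_label(label)
--     if not norm:
--         return None
--     # Pass 1: exact
--     for canonical, synonyms in _SYNONYMS.items():
--         for syn in synonyms:
--             if syn == norm: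
--                 return canonical
--     # Pass 2: longest substring
--     best_canonical: Optional[str] = None
--     best_len = 0
--     for canonical, synonyms in _SYNONYMS.items():
--         for syn in synonyms:
--             if syn in norm and len(syn) > best_len:
--                 best_canonical = canonical
--                 best_len = len(syn)
--     return best_canonical
-- ===== SOURCE B (Python) =====
-- from typing import Optional
--
-- _PUNCT = set(".,;&\u2013\u2014")
--
-- # Flat (synonym, canonical) pair table, stably pre-sorted once by descending
-- # synonym length: the first substring hit during the scan is the winner.
-- _PAIRS = sorted([
--     ('revenue', 'revenue'),
--     ('sales', 'revenue'),
--     ('turnover', 'revenue'),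
--     ('total revenue', 'revenue'),
--     ('net revenue', 'revenue'),
--     ('net sales', 'revenue'),
--     ('total net sales', 'revenue'),
--     ('total revenues', 'revenue'),
--     ('cogs', 'cogs'),
--     ('cost of sales', 'cogs'),
--     ('cost of revenue', 'cogs'),
--     ('cost of goods sold', 'cogs'),
--     ('cost of products', 'cogs'),
--     ('cost of services', 'cogs'),
--     ('total cost of sales', 'cogs'),
--     ('total cost of revenue', 'cogs'),
--     ('gross profit', 'gross_profit'),
--     ('gross income', 'gross_profit'),
--     ('research and development', 'research_and_development'),
--     ('research development', 'research_and_development'),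
--     ('research development and engineering', 'research_and_development'),
--     ('sales and marketing', 'sales_marketing'),
--     ('selling and marketing', 'sales_marketing'),
--     ('marketing and sales', 'sales_marketing'),
--     ('sales marketing and support', 'sales_marketing'),
--     ('operating expenses', 'operating_expenses'),
--     ('opex', 'operating_expenses'),
--     ('sg&a', 'operating_expenses'),
--     ('selling general and administrative', 'operating_expenses'),
--     ('selling general administrative', 'operating_expenses'),
--     ('selling general and administrative expenses', 'operating_expenses'),
--     ('total operating expenses', 'operating_expenses'),
--     ('selling marketing and administrative', 'operating_expenses'),
--     ('general and administrative', 'operating_expenses'),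
--     ('general and administrative expenses', 'operating_expenses'),
--     ('operating income', 'operating_income'),
--     ('operating profit', 'operating_income'),
--     ('ebit', 'operating_income'),
--     ('income from operations', 'operating_income'),
--     ('operating earnings', 'operating_income'),
--     ('tax', 'taxes'),
--     ('taxes', 'taxes'),
--     ('income tax', 'taxes'),
--     ('income taxes', 'taxes'),
--     ('provision for income taxes', 'taxes'),
--     ('provision for income tax', 'taxes'),
--     ('income tax expense', 'taxes'),
--     ('interest', 'interest'),
--     ('interest expense', 'interest'),
--     ('interest income', 'interest'),
--     ('net interest expense', 'interest'),
--     ('net interest income', 'interest'),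
--     ('net income', 'net_income'),
--     ('net profit', 'net_income'),
--     ('profit after tax', 'net_income'),
--     ('profit', 'net_income'),
--     ('net earnings', 'net_income'),
--     ('earnings', 'net_income'),
--     ('net income attributable', 'net_income'),
-- ], key=lambda p: len(p[0]), reverse=True)
--
-- def _normalize_label(s: str) -> str:
--     if not isinstance(s, str):
--         return ""
--     s = s.lower().strip().rstrip(":")
--     return " ".join("".join(" " if c in _PUNCT else c for c in s).split())
--
-- def _match_canonical(label: str) -> Optional[str]:
--     """Single scan of the pre-sorted pair table; first substring hit wins."""
--     norm = _normalize_label(label)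
--     if not norm:
--         return None
--     for syn, canonical in _PAIRS:
--         if syn in norm:
--             return canonical
--     return None
-- ===== Notes on version B (the rewrite author's own statement) =====
-- stated objective: simpler
-- what changed: Replaces A's nested synonym dict and two passes (exact match, then longest-substring argmax with a best/best_len accumulator) by a flat (synonym, canonical) pair table stably pre-sorted once by descending length and one recursive scan whose first substring hit wins, and replaces the normalizer's chain of per-punctuation str.replace calls by a single character-map pass.
import Mathlib
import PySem

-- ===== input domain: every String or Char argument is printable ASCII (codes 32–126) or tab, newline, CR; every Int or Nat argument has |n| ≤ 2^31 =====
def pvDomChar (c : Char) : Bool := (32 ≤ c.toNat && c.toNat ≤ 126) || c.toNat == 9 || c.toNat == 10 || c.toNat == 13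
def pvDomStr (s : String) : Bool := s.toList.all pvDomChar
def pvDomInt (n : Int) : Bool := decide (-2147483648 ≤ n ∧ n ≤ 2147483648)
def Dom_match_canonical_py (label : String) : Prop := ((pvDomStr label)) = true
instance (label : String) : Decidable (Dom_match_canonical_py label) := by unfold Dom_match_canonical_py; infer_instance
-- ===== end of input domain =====

-- B replaces A's two passes over the nested synonym dict (exact match, then longest-substring
-- argmax) by one recursive scan of a flat (synonym, canonical) pair table stably pre-sorted once
-- by descending synonym length, and its label normalization is a single character-map pass
-- instead of A's chain of per-punctuation replaces (objective: simpler).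

-- ===== PORT A =====
-- the _SYNONYMS dict of Source A (insertion order)
def pySynTable : List (String × List String) := [
  ("revenue", ["revenue", "sales", "turnover", "total revenue", "net revenue", "net sales", "total net sales", "total revenues"]),
  ("cogs", ["cogs", "cost of sales", "cost of revenue", "cost of goods sold", "cost of products", "cost of services", "total cost of sales", "total cost of revenue"]),
  ("gross_profit", ["gross profit", "gross income"]),
  ("research_and_development", ["research and development", "research development", "research development and engineering"]),
  ("sales_marketing", ["sales and marketing", "selling and marketing", "marketing and sales", "sales marketing and support"]),
  ("operating_expenses", ["operating expenses", "opex", "sg&a", "selling general and administrative", "selling general administrative", "selling general and administrative expenses", "total operating expenses", "selling marketing and administrative", "general and administrative", "general and administrative expenses"]),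
  ("operating_income", ["operating income", "operating profit", "ebit", "income from operations", "operating earnings"]),
  ("taxes", ["tax", "taxes", "income tax", "income taxes", "provision for income taxes", "provision for income tax", "income tax expense"]),
  ("interest", ["interest", "interest expense", "interest income", "net interest expense", "net interest income"]),
  ("net_income", ["net income", "net profit", "profit after tax", "profit", "net earnings", "earnings", "net income attributable"])]

-- Source A's _normalize_label: lower/strip, hand-ported rstrip(":") (exact: drop trailing ':'),
-- then a loop of str.replace over ".,;&" plus two dash replaces, then " ".join(s.split())
def pyNormalizeLabel (s : String) : List Char :=
  let s1 := PySem.Chars.strip (PySem.Chars.lower s.toList)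
  let s2 := (s1.reverse.dropWhile (· == ':')).reverse
  let s3 := ['.', ',', ';', '&'].foldl (fun acc c => PySem.Chars.replace acc [c] [' ']) s2
  let s4 := PySem.Chars.replace (PySem.Chars.replace s3 ['\u2013'] [' ']) ['\u2014'] [' ']
  PySem.Chars.join [' '] (PySem.Chars.split₀ s4)

-- Pass 1: exact (nested loops with early return = findSome?)
def pyPass1 (norm : List Char) : Option String :=
  pySynTable.findSome? (fun cs =>
    cs.2.findSome? (fun syn => if syn.toList = norm then some cs.1 else none))

def match_canonical_py (label : String) : Option String :=
  let norm := pyNormalizeLabel label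
  if norm = [] then none
  else
    match pyPass1 norm with
    | some c => some c
    | none =>
        -- Pass 2: longest substring (best_canonical / best_len accumulator)
        (pySynTable.foldl (fun st cs =>
          cs.2.foldl (fun st syn =>
            if PySem.Chars.isIn syn.toList norm ∧ syn.toList.length > st.2
            then (some cs.1, syn.toList.length) else st) st)
          ((none : Option String), 0)).1

-- ===== PORT B =====
-- Source B's punctuation set and its single-pass normalizer (rstrip(":") hand-ported as above;
-- the per-character "\" \" if c in _PUNCT else c" comprehension becomes List.map)
def pbPunct : List Char := ['.', ',', ';', '&', '\u2013', '\u2014']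

def pbNormalize (s : String) : List Char :=
  let t := ((PySem.Chars.strip (PySem.Chars.lower s.toList)).reverse.dropWhile (· == ':')).reverse
  PySem.Chars.join [' ']
    (PySem.Chars.split₀ (t.map (fun c => if pbPunct.contains c then ' ' else c)))

-- Source B's flat _PAIRS literal, before the import-time sort (insertion order)
def pbRaw : List (String × String) := [
  ("revenue", "revenue"),
  ("sales", "revenue"),
  ("turnover", "revenue"),
  ("total revenue", "revenue"),
  ("net revenue", "revenue"),
  ("net sales", "revenue"),
  ("total net sales", "revenue"),
  ("total revenues", "revenue"),
  ("cogs", "cogs"),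
  ("cost of sales", "cogs"),
  ("cost of revenue", "cogs"),
  ("cost of goods sold", "cogs"),
  ("cost of products", "cogs"),
  ("cost of services", "cogs"),
  ("total cost of sales", "cogs"),
  ("total cost of revenue", "cogs"),
  ("gross profit", "gross_profit"),
  ("gross income", "gross_profit"),
  ("research and development", "research_and_development"),
  ("research development", "research_and_development"),
  ("research development and engineering", "research_and_development"),
  ("sales and marketing", "sales_marketing"),
  ("selling and marketing", "sales_marketing"),
  ("marketing and sales", "sales_marketing"),
  ("sales marketing and support", "sales_marketing"),
  ("operating expenses", "operating_expenses"),
  ("opex", "operating_expenses"),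
  ("sg&a", "operating_expenses"),
  ("selling general and administrative", "operating_expenses"),
  ("selling general administrative", "operating_expenses"),
  ("selling general and administrative expenses", "operating_expenses"),
  ("total operating expenses", "operating_expenses"),
  ("selling marketing and administrative", "operating_expenses"),
  ("general and administrative", "operating_expenses"),
  ("general and administrative expenses", "operating_expenses"),
  ("operating income", "operating_income"),
  ("operating profit", "operating_income"),
  ("ebit", "operating_income"),
  ("income from operations", "operating_income"),
  ("operating earnings", "operating_income"),
  ("tax", "taxes"),
  ("taxes", "taxes"),
  ("income tax", "taxes"),
  ("income taxes", "taxes"),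
  ("provision for income taxes", "taxes"),
  ("provision for income tax", "taxes"),
  ("income tax expense", "taxes"),
  ("interest", "interest"),
  ("interest expense", "interest"),
  ("interest income", "interest"),
  ("net interest expense", "interest"),
  ("net interest income", "interest"),
  ("net income", "net_income"),
  ("net profit", "net_income"),
  ("profit after tax", "net_income"),
  ("profit", "net_income"),
  ("net earnings", "net_income"),
  ("earnings", "net_income"),
  ("net income attributable", "net_income")]

-- sorted(_PAIRS_raw, key=len of synonym, reverse=True) — stable
def pbPairs : List (String × String) :=
  PySem.List.sorted pbRaw (fun p => PySem.Str.len p.1) true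

-- Source B's scan loop: first pair whose synonym is a substring wins
def pbScan (pairs : List (String × String)) (norm : List Char) : Option String :=
  match pairs with
  | [] => none
  | (syn, canonical) :: rest =>
      if PySem.Chars.isIn syn.toList norm then some canonical else pbScan rest norm

def match_canonical_py_alt (label : String) : Option String :=
  let norm := pbNormalize label
  if norm = [] then none
  else pbScan pbPairs norm

-- ===== PRECONDITION & SPEC =====
def Spec_match_canonical_py (label : String) (out : Option String) : Prop := out = match_canonical_py_alt label
instance (label : String) (out : Option String) : Decidable (Spec_match_canonical_py label out) := by unfold Spec_match_canonical_py; infer_instance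

-- ===== CLAIM (what is proved, stated in full; the proofs are below) =====
def Claim_equal_match_canonical_py : Prop := ∀ (label : String), Dom_match_canonical_py label → Spec_match_canonical_py label (match_canonical_py label)

-- ===== LEMMAS AND PROOFS =====

-- relating B's one-pass char map to A's chain of replaces
theorem pv_go_single (c r : Char) :
    ∀ (l : List Char) (fuel : Nat) (acc : List Char), l.length ≤ fuel →
      PySem.Chars.replace.go [c] [r] fuel l acc
        = acc.reverse ++ l.map (fun d => if d = c then r else d) := by
  intro l
  induction l with
  | nil =>
    intro fuel acc _
    cases fuel <;> simp [PySem.Chars.replace.go]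
  | cons d t ih =>
    intro fuel acc hle
    cases fuel with
    | zero => simp at hle
    | succ fuel =>
      rw [PySem.Chars.replace.go]
      simp only [List.isPrefixOf, Bool.and_true, List.length_cons] at *
      by_cases h : d = c
      · subst h
        simp only [BEq.rfl, if_pos]
        rw [show List.drop ([].length + 1) (d :: t) = t from rfl, ih fuel _ (by omega)]
        simp
      · have hb : (c == d) = false := beq_eq_false_iff_ne.mpr (fun e => h e.symm)
        simp only [hb, Bool.false_eq_true, if_neg, not_false_iff]
        rw [ih fuel _ (by omega)]
        simp [h]

theorem pv_replace_single (s : List Char) (c r : Char) :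
    PySem.Chars.replace s [c] [r] = s.map (fun d => if d = c then r else d) := by
  rw [PySem.Chars.replace]
  simp [pv_go_single c r s s.length [] (le_refl _)]

theorem pv_chain_map (t : List Char) :
    PySem.Chars.replace
      (PySem.Chars.replace
        (['.', ',', ';', '&'].foldl (fun acc c => PySem.Chars.replace acc [c] [' ']) t)
        ['\u2013'] [' '])
      ['\u2014'] [' ']
    = t.map (fun c => if pbPunct.contains c then ' ' else c) := by
  simp only [List.foldl_cons, List.foldl_nil, pv_replace_single, List.map_map]
  apply List.map_congr_left
  intro d _
  by_cases h1 : d = '.'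
  · subst h1; decide
  by_cases h2 : d = ','
  · subst h2; decide
  by_cases h3 : d = ';'
  · subst h3; decide
  by_cases h4 : d = '&'
  · subst h4; decide
  by_cases h5 : d = '\u2013'
  · subst h5; decide
  by_cases h6 : d = '\u2014'
  · subst h6; decide
  simp [Function.comp, pbPunct, h1, h2, h3, h4, h5, h6]

theorem pv_norm_eq (s : String) : pbNormalize s = pyNormalizeLabel s := by
  simp only [pbNormalize, pyNormalizeLabel, pv_chain_map]

-- the flattened pair list, in A's iteration (insertion) order
def pvP : List (String × String) := pySynTable.flatMap (fun cs => cs.2.map (fun syn => (syn, cs.1)))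
-- the distinct synonym lengths, decreasing
def pvKs : List Nat := [43, 36, 35, 34, 30, 27, 26, 24, 23, 22, 21, 20, 19, 18, 16, 15, 14, 13, 12, 11, 10, 9, 8, 7, 6, 5, 4, 3]
def pvQ (k : Nat) (p : String × String) : Bool := p.1.toList.length == k
def pvSubF (norm : List Char) (p : String × String) : Option String :=
  if PySem.Chars.isIn p.1.toList norm then some p.2 else none
def pvG (k : Nat) (norm : List Char) (p : String × String) : Option String :=
  if p.1.toList.length = k then pvSubF norm p else none
def pvStep (norm : List Char) (st : Option String × Nat) (p : String × String) : Option String × Nat :=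
  if PySem.Chars.isIn p.1.toList norm ∧ p.1.toList.length > st.2
  then (some p.2, p.1.toList.length) else st
def pvChain (ks : List Nat) (norm : List Char) : Option String :=
  ks.foldr (fun k r => ((pvP.filter (pvQ k)).findSome? (pvSubF norm)).or r) none

theorem pv_findSome?_flatMap {α β γ : Type} (xs : List α) (f : α → List β) (g : β → Option γ) :
    (xs.flatMap f).findSome? g = xs.findSome? (fun x => (f x).findSome? g) := by
  induction xs with
  | nil => rfl
  | cons x xs ih =>
    rw [List.flatMap_cons, List.findSome?_append, List.findSome?_cons, ih]
    cases List.findSome? g (f x) <;> rfl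

theorem pv_findSome?_filter {α β : Type} (M : List α) (q : α → Bool) (f : α → Option β) :
    (M.filter q).findSome? f = M.findSome? (fun x => if q x then f x else none) := by
  induction M with
  | nil => rfl
  | cons x M ih =>
    rw [List.filter_cons, List.findSome?_cons]
    by_cases h : q x = true
    · rw [if_pos h, if_pos h, List.findSome?_cons, ih]
    · rw [if_neg h, if_neg h, ih]

theorem pv_filter_g (k : Nat) (norm : List Char) :
    (pvP.filter (pvQ k)).findSome? (pvSubF norm) = pvP.findSome? (pvG k norm) := by
  rw [pv_findSome?_filter]
  congr 1
  funext p
  simp [pvQ, pvG]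

theorem pv_foldA (norm : List Char) :
    (pySynTable.foldl (fun st cs =>
        cs.2.foldl (fun st syn =>
          if PySem.Chars.isIn syn.toList norm ∧ syn.toList.length > st.2
          then (some cs.1, syn.toList.length) else st) st)
      ((none : Option String), 0))
      = pvP.foldl (pvStep norm) (none, 0) := by
  simp [pvP, List.foldl_flatMap, List.foldl_map, pvStep]

theorem pv_pass1 (norm : List Char) :
    pyPass1 norm = pvP.findSome? (fun p => if p.1.toList = norm then some p.2 else none) := by
  simp [pyPass1, pvP, pv_findSome?_flatMap, List.findSome?_map]
  rfl

theorem pv_exact_eq_g (norm : List Char) :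
    (fun p : String × String => if p.1.toList = norm then some p.2 else none)
      = pvG norm.length norm := by
  funext p
  by_cases he : p.1.toList = norm
  · simp [he, pvG, pvSubF, PySem.Chars.isIn_iff_infix]
  · rw [if_neg he]
    unfold pvG pvSubF
    by_cases hl : p.1.toList.length = norm.length
    · rw [if_pos hl]
      by_cases hs : PySem.Chars.isIn p.1.toList norm = true
      · exact absurd (((PySem.Chars.isIn_iff_infix _ _).mp hs).eq_of_length hl) he
      · rw [if_neg hs]
    · rw [if_neg hl]

-- the fold never updates once every substring match is no longer than the stored length
theorem pv_fold_frozen (norm : List Char) (M : List (String × String))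
    (s : Option String) (L : Nat)
    (h : ∀ p ∈ M, PySem.Chars.isIn p.1.toList norm = true → p.1.toList.length ≤ L) :
    M.foldl (pvStep norm) (s, L) = (s, L) := by
  induction M with
  | nil => rfl
  | cons p M ih =>
    have hstep : pvStep norm (s, L) p = (s, L) := by
      unfold pvStep
      rw [if_neg]
      rintro ⟨hs, hgt⟩
      have := h p List.mem_cons_self hs
      omega
    rw [List.foldl_cons, hstep]
    exact ih (fun q hq => h q (List.mem_cons_of_mem _ hq))

-- if some pair of length exactly k substring-matches, the fold returns the first such canonical
theorem pv_fold_hit (norm : List Char) (k : Nat) (c : String) :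
    ∀ (M : List (String × String)) (s : Option String) (L : Nat), L < k →
    (∀ p ∈ M, PySem.Chars.isIn p.1.toList norm = true → p.1.toList.length ≤ k) →
    M.findSome? (pvG k norm) = some c →
    (M.foldl (pvStep norm) (s, L)).1 = some c := by
  intro M
  induction M with
  | nil => intro s L _ _ hf; simp at hf
  | cons p M ih =>
    intro s L hL hle hf
    rw [List.findSome?_cons] at hf
    have hrest : ∀ q ∈ M, PySem.Chars.isIn q.1.toList norm = true → q.1.toList.length ≤ k :=
      fun q hq => hle q (List.mem_cons_of_mem _ hq)
    rw [List.foldl_cons]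
    cases hg : pvG k norm p with
    | none =>
      rw [hg] at hf
      by_cases hcond : PySem.Chars.isIn p.1.toList norm = true ∧ p.1.toList.length > L
      · have hlt : p.1.toList.length < k := by
          rcases hcond with ⟨hs, _⟩
          have hub := hle p List.mem_cons_self hs
          rcases Nat.lt_or_ge p.1.toList.length k with hlt | hge
          · exact hlt
          · exfalso
            have hlk : p.1.toList.length = k := by omega
            unfold pvG pvSubF at hg
            rw [if_pos hlk, if_pos hs] at hg
            simp at hg
        have hstep : pvStep norm (s, L) p = (some p.2, p.1.toList.length) := by
          unfold pvStep; rw [if_pos hcond]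
        rw [hstep]
        exact ih _ _ hlt hrest hf
      · have hstep : pvStep norm (s, L) p = (s, L) := by
          unfold pvStep; rw [if_neg hcond]
        rw [hstep]
        exact ih _ _ hL hrest hf
    | some c' =>
      rw [hg] at hf
      have hc : c' = c := by simpa using hf
      have hlk : p.1.toList.length = k := by
        by_contra hne
        unfold pvG at hg
        rw [if_neg hne] at hg
        simp at hg
      have hs : PySem.Chars.isIn p.1.toList norm = true := by
        by_contra hns
        unfold pvG pvSubF at hg
        rw [if_pos hlk, if_neg hns] at hg
        simp at hg
      have hp2 : p.2 = c' := by
        unfold pvG pvSubF at hg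
        rw [if_pos hlk, if_pos hs] at hg
        exact Option.some.inj hg
      have hstep : pvStep norm (s, L) p = (some p.2, p.1.toList.length) := by
        unfold pvStep
        rw [if_pos ⟨hs, by omega⟩]
      rw [hstep, pv_fold_frozen norm M (some p.2) p.1.toList.length
            (fun q hq hqs => by have := hrest q hq hqs; omega)]
      rw [hp2, hc]

theorem pv_main (norm : List Char) :
    ∀ ks : List Nat, ks.Pairwise (· > ·) → (∀ k ∈ ks, 0 < k) →
    (∀ p ∈ pvP, PySem.Chars.isIn p.1.toList norm = true → p.1.toList.length ∈ ks) →
    (pvP.foldl (pvStep norm) (none, 0)).1 = pvChain ks norm := by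
  intro ks
  induction ks with
  | nil =>
    intro _ _ h
    rw [pv_fold_frozen norm pvP none 0 (fun p hp hs => ((List.not_mem_nil) (h p hp hs)).elim)]
    rfl
  | cons k ks ih =>
    intro hpw hpos h
    have hk0 : 0 < k := hpos k List.mem_cons_self
    have hlt : ∀ k' ∈ ks, k' < k := (List.pairwise_cons.mp hpw).1
    have hle : ∀ p ∈ pvP, PySem.Chars.isIn p.1.toList norm = true → p.1.toList.length ≤ k := by
      intro p hp hs
      rcases List.mem_cons.mp (h p hp hs) with he | hm
      · omega
      · have := hlt _ hm; omega
    have hchain : pvChain (k :: ks) norm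
        = ((pvP.filter (pvQ k)).findSome? (pvSubF norm)).or (pvChain ks norm) := rfl
    rw [hchain, pv_filter_g]
    cases hfk : pvP.findSome? (pvG k norm) with
    | some c =>
      rw [pv_fold_hit norm k c pvP none 0 hk0 hle hfk]
      rfl
    | none =>
      rw [Option.none_or]
      apply ih (List.pairwise_cons.mp hpw).2 (fun k' hk' => hpos _ (List.mem_cons_of_mem _ hk'))
      intro p hp hs
      rcases List.mem_cons.mp (h p hp hs) with he | hm
      · exfalso
        have hnone := List.findSome?_eq_none_iff.mp hfk p hp
        unfold pvG pvSubF at hnone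
        rw [if_pos he, if_pos hs] at hnone
        simp at hnone
      · exact hm

theorem pv_F_none_of_gt (norm : List Char) (k : Nat) (h : norm.length < k) :
    (pvP.filter (pvQ k)).findSome? (pvSubF norm) = none := by
  rw [List.findSome?_eq_none_iff]
  intro p hp
  have hk : p.1.toList.length = k := by
    have := (List.mem_filter.mp hp).2
    simpa [pvQ] using this
  unfold pvSubF
  rw [if_neg]
  intro hs
  have := ((PySem.Chars.isIn_iff_infix _ _).mp hs).length_le
  omega

theorem pv_or_chain (norm : List Char) :
    ∀ ks : List Nat, ks.Pairwise (· > ·) →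
    (norm.length ∈ ks ∨ pvP.findSome? (pvG norm.length norm) = none) →
    (pvP.findSome? (pvG norm.length norm)).or (pvChain ks norm) = pvChain ks norm := by
  intro ks
  induction ks with
  | nil =>
    rintro _ (h | h)
    · exact absurd h (List.not_mem_nil)
    · rw [h]; rfl
  | cons k ks ih =>
    rintro hpw (h | h)
    · have hchain : pvChain (k :: ks) norm
          = ((pvP.filter (pvQ k)).findSome? (pvSubF norm)).or (pvChain ks norm) := rfl
      rcases List.mem_cons.mp h with he | hm
      · rw [hchain, pv_filter_g, ← he, ← Option.or_assoc, Option.or_self]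
      · have hk : norm.length < k := (List.pairwise_cons.mp hpw).1 _ hm
        rw [hchain, pv_F_none_of_gt norm k hk, Option.none_or]
        exact ih (List.pairwise_cons.mp hpw).2 (Or.inl hm)
    · rw [h, Option.none_or]

theorem pv_lens : ∀ p ∈ pvP, p.1.toList.length ∈ pvKs := by decide

theorem pv_g_none (norm : List Char) (h : norm.length ∉ pvKs) :
    pvP.findSome? (pvG norm.length norm) = none := by
  rw [List.findSome?_eq_none_iff]
  intro p hp
  unfold pvG
  rw [if_neg]
  intro hl
  exact h (hl ▸ pv_lens p hp)

theorem pv_scan_eq_findSome? (norm : List Char) :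
    ∀ M : List (String × String), pbScan M norm = M.findSome? (pvSubF norm) := by
  intro M
  induction M with
  | nil => rfl
  | cons p M ih =>
    cases p with
    | mk syn c =>
      rw [List.findSome?_cons]
      unfold pbScan
      by_cases h : PySem.Chars.isIn syn.toList norm = true
      · simp [pvSubF, h]
      · simp [pvSubF, h, ih]

theorem pv_split : pbPairs = pvP.filter (pvQ 43) ++
    pvP.filter (pvQ 36) ++
    pvP.filter (pvQ 35) ++
    pvP.filter (pvQ 34) ++
    pvP.filter (pvQ 30) ++
    pvP.filter (pvQ 27) ++
    pvP.filter (pvQ 26) ++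
    pvP.filter (pvQ 24) ++
    pvP.filter (pvQ 23) ++
    pvP.filter (pvQ 22) ++
    pvP.filter (pvQ 21) ++
    pvP.filter (pvQ 20) ++
    pvP.filter (pvQ 19) ++
    pvP.filter (pvQ 18) ++
    pvP.filter (pvQ 16) ++
    pvP.filter (pvQ 15) ++
    pvP.filter (pvQ 14) ++
    pvP.filter (pvQ 13) ++
    pvP.filter (pvQ 12) ++
    pvP.filter (pvQ 11) ++
    pvP.filter (pvQ 10) ++
    pvP.filter (pvQ 9) ++
    pvP.filter (pvQ 8) ++
    pvP.filter (pvQ 7) ++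
    pvP.filter (pvQ 6) ++
    pvP.filter (pvQ 5) ++
    pvP.filter (pvQ 4) ++
    pvP.filter (pvQ 3) := by decide

theorem pv_Bside (norm : List Char) :
    pbScan pbPairs norm = pvChain pvKs norm := by
  rw [pv_scan_eq_findSome?, pv_split]
  simp only [List.findSome?_append]
  simp [pvChain, pvKs, Option.or_assoc]

-- ===== VERDICT (by name: the statement is the Claim_ definition above) =====
set_option maxHeartbeats 1600000 in
theorem match_canonical_py_spec : Claim_equal_match_canonical_py := by
  intro label _
  unfold Spec_match_canonical_py
  simp only [match_canonical_py, match_canonical_py_alt, pv_norm_eq]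
  by_cases h0 : pyNormalizeLabel label = []
  · rw [if_pos h0, if_pos h0]
  · rw [if_neg h0, if_neg h0]
    rw [pv_Bside, pv_foldA]
    cases hp : pyPass1 (pyNormalizeLabel label) with
    | none =>
      exact pv_main (pyNormalizeLabel label) pvKs (by decide) (by decide) (fun p hp hs => pv_lens p hp)
    | some c =>
      rw [pv_pass1, pv_exact_eq_g] at hp
      have hor := pv_or_chain (pyNormalizeLabel label) pvKs (by decide) (by
        by_cases hmem : (pyNormalizeLabel label).length ∈ pvKs
        · exact Or.inl hmem
        · exact Or.inr (pv_g_none _ hmem))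
      rw [hp, Option.some_or] at hor
      exact hor
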